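-- pv_equiv track=rewrite | github.com/VictorSaf/co2 | backend/tests/test_uuid_generation.py | generate_uuid_frontend_simulation
-- ===== SOURCE A (Python) =====
-- def generate_uuid_frontend_simulation(username: str) -> str:
--     """
--     Frontend UUID generation algorithm simulation (from AuthContext.tsx)
--     This simulates the JavaScript implementation in Python for testing
--     """
--     hash = 0
--     for i in range(len(username)):
--         char = ord(username[i])
--         hash = ((hash << 5) - hash) + char
--         hash = hash & hash  # Convert to 32-bit integer
--     positive_hash = format(abs(hash), 'x').zfill(8)
--     return f"00000000-0000-4000-8000-{positive_hash}{positive_hash}{positive_hash}{positive_hash}"[:36]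
-- ===== SOURCE B (Python) =====
-- def generate_uuid_frontend_simulation(username: str) -> str:
--     """Power-sum form of the JS-style 31-polynomial hash (right-to-left, running
--     power of 31), then the same UUID formatting tail."""
--     total, p = 0, 1
--     for c in reversed(username):
--         total += ord(c) * p
--         p *= 31
--     positive_hash = format(abs(total), 'x').zfill(8)
--     return ("00000000-0000-4000-8000-" + positive_hash * 4)[:36]
-- ===== Notes on version B (the rewrite author's own statement) =====
-- stated objective: alternative
-- what changed: The Horner rolling-hash loop (hash = ((hash<<5)-hash)+ord(c) with a no-op hash & hash) is replaced by a right-to-left power-sum: iterate over reversed(username) accumulating total += ord(c)*p alongside a running power p *= 31; the formatting/tiling tail is unchanged.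
import Mathlib
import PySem

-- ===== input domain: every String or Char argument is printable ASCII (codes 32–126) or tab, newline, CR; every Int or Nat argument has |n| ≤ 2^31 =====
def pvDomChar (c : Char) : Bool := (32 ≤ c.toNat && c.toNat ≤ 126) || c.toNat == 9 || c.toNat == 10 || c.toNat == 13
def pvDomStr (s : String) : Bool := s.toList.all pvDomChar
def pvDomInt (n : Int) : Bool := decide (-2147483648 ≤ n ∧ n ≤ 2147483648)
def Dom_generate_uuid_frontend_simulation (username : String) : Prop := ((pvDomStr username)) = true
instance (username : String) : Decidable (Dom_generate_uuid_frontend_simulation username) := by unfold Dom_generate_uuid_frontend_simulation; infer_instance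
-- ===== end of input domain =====

-- B replaces A's Horner rolling-hash loop by an explicit power-sum of per-character terms; same formatting tail (objective: alternative decomposition, not speed).

-- ===== PORT A =====
-- format(n, 'x') for n ≥ 0, written by hand (PySem has no hex formatter); exact for the
-- only use here, n = abs(hash) ≥ 0.
def pvHexDigit (d : Nat) : Char := if d < 10 then Char.ofNat (48 + d) else Char.ofNat (87 + d)
def pvHexChars : Nat → List Char
  | 0 => []
  | (n+1) => pvHexChars ((n+1) / 16) ++ [pvHexDigit ((n+1) % 16)]
decreasing_by exact Nat.div_lt_self (Nat.succ_pos n) (by omega)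
def pvToHex (n : Nat) : String := if n = 0 then "0" else String.ofList (pvHexChars n)

def generate_uuid_frontend_simulation (username : String) : String :=
  -- for i in range(len(username)): char = ord(username[i]);
  --   hash = ((hash << 5) - hash) + char; hash = hash & hash
  let hash : Int := username.toList.foldl (fun h c =>
    let h2 := ((h <<< (5 : Nat)) - h) + (c.toNat : Int)
    PySem.Int.band h2 h2) 0
  let positive_hash := PySem.Str.zfill (pvToHex hash.natAbs) 8
  PySem.Str.slice ("00000000-0000-4000-8000-" ++ positive_hash ++ positive_hash ++ positive_hash ++ positive_hash) none (some 36)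

-- ===== PORT B =====
def generate_uuid_frontend_simulation_alt (username : String) : String :=
  -- total, p = 0, 1
  -- for c in reversed(username): total += ord(c) * p; p *= 31
  let tp : Int × Int := username.toList.reverse.foldl
    (fun (s : Int × Int) c => (s.1 + (c.toNat : Int) * s.2, s.2 * 31)) (0, 1)
  let positive_hash := PySem.Str.zfill (pvToHex tp.1.natAbs) 8
  -- ("00000000-0000-4000-8000-" + positive_hash * 4)[:36]
  PySem.Str.slice ("00000000-0000-4000-8000-" ++ String.ofList (PySem.List.pyRepeat positive_hash.toList 4)) none (some 36)

-- ===== PRECONDITION & SPEC =====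
def Spec_generate_uuid_frontend_simulation (username : String) (out : String) : Prop := out = generate_uuid_frontend_simulation_alt username
instance (username : String) (out : String) : Decidable (Spec_generate_uuid_frontend_simulation username out) := by unfold Spec_generate_uuid_frontend_simulation; infer_instance

-- ===== CLAIM (what is proved, stated in full; the proofs are below) =====
def Claim_equal_generate_uuid_frontend_simulation : Prop := ∀ (username : String), Dom_generate_uuid_frontend_simulation username → Spec_generate_uuid_frontend_simulation username (generate_uuid_frontend_simulation username)

-- ===== LEMMAS AND PROOFS =====

-- the value sum_k ord(ds[k]) * 31^k (exponent = position from the LEFT of ds)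
def pvR : List Char → Int
  | [] => 0
  | c :: ds => (c.toNat : Int) + 31 * pvR ds

lemma pvR_append_singleton (ds : List Char) (c : Char) :
    pvR (ds ++ [c]) = pvR ds + (c.toNat : Int) * 31 ^ ds.length := by
  induction ds with
  | nil => simp [pvR]
  | cons d ds ih => simp [pvR, ih, pow_succ]; ring

-- A's Horner loop computes a * 31^n + pvR (cs.reverse)
lemma pvHorner_simple (cs : List Char) (a : Int) :
    cs.foldl (fun (h : Int) c => h * 31 + (c.toNat : Int)) a
      = a * 31 ^ cs.length + pvR cs.reverse := by
  induction cs generalizing a with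
  | nil => simp [pvR]
  | cons c cs ih =>
    rw [List.foldl_cons, ih, List.reverse_cons, pvR_append_singleton,
        List.length_cons, List.length_reverse, pow_succ]
    ring

lemma pvHorner (cs : List Char) (a : Int) :
    cs.foldl (fun (h : Int) c =>
      let h2 := ((h <<< (5 : Nat)) - h) + (c.toNat : Int)
      PySem.Int.band h2 h2) a = a * 31 ^ cs.length + pvR cs.reverse := by
  have hf : (fun (h : Int) c =>
      let h2 := ((h <<< (5 : Nat)) - h) + (c.toNat : Int)
      PySem.Int.band h2 h2) = fun (h : Int) (c : Char) => h * 31 + (c.toNat : Int) := by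
    funext h c
    simp only [PySem.Int.band_self, Int.shiftLeft_eq]
    ring
  rw [hf, pvHorner_simple]

-- B's pair loop: invariant for (total, power)
lemma pvPair (ds : List Char) (t p : Int) :
    ds.foldl (fun (s : Int × Int) c => (s.1 + (c.toNat : Int) * s.2, s.2 * 31)) (t, p)
      = (t + p * pvR ds, p * 31 ^ ds.length) := by
  induction ds generalizing t p with
  | nil => simp [pvR]
  | cons c ds ih =>
    rw [List.foldl_cons, ih]
    simp only [pvR, List.length_cons, pow_succ, Prod.mk.injEq]
    constructor <;> ring

theorem generate_uuid_frontend_simulation_hash_eq (username : String) :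
    generate_uuid_frontend_simulation username = generate_uuid_frontend_simulation_alt username := by
  unfold generate_uuid_frontend_simulation generate_uuid_frontend_simulation_alt
  rw [pvHorner, pvPair]
  simp only [zero_mul, zero_add, one_mul]
  generalize PySem.Str.zfill (pvToHex (pvR username.toList.reverse).natAbs) 8 = ph
  have hrep : PySem.List.pyRepeat ph.toList 4 = ph.toList ++ ph.toList ++ ph.toList ++ ph.toList := by
    simp [PySem.List.pyRepeat, List.replicate]
  rw [hrep]
  congr 1
  simp [String.append_assoc]

-- ===== VERDICT (by name: the statement is the Claim_ definition above) =====
theorem generate_uuid_frontend_simulation_spec : Claim_equal_generate_uuid_frontend_simulation := by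
  intro username _
  unfold Spec_generate_uuid_frontend_simulation
  exact generate_uuid_frontend_simulation_hash_eq username
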